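-- pv_equiv track=rewrite | github.com/MaxwellVolz/tower_runner | tower_detection/utils.py | generate_spiral_sequence
-- ===== SOURCE A (Python) =====
-- def generate_spiral_sequence(length):
--     """
--     Generate a spiral sequence for a given length X.
--
--     Args:
--     - length (int): The total number of steps in the spiral.
--
--     Returns:
--     - list: A sequence of steps in the spiral.
--     """
--     if length < 1:
--         return []
--
--     sequence = []
--     direction_count = 1  # Initial number of steps in each direction
--     total_moves_made = 0  # Keep track of the total moves made
--
--     while total_moves_made < length:
--         for _ in range(4):  # Four directions: down, left, up, right
--             if total_moves_made + direction_count > length: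
--                 # Adjust the last direction count to not exceed the total length
--                 direction_count = length - total_moves_made
--             sequence.append(direction_count)
--             total_moves_made += direction_count
--             if total_moves_made == length:
--                 break  # Stop if the desired length is reached
--         direction_count += 1  # Increase the steps for the next cycle
--
--     return sequence
-- ===== SOURCE B (Python) =====
-- import math
--
-- def generate_spiral_sequence(length):
--     if length < 1:
--         return []
--     # largest g with 2*g*(g+1) <= length
--     g = (math.isqrt(2 * length + 1) - 1) // 2
--     rem = length - 2 * g * (g + 1)
--     v = g + 1
--     k, r = divmod(rem, v)
--     seq = [val for val in range(1, g + 1) for _ in range(4)]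
--     seq += [v] * k
--     if r:
--         seq.append(r)
--     return seq
-- ===== Notes on version B (the rewrite author's own statement) =====
-- stated objective: alternative
-- what changed: Replaces the emit loop that carries a running total with closed-form arithmetic: isqrt finds the number g of complete 4-copy groups (partial sum 2g(g+1)), divmod splits the remainder into full copies of g+1 and one truncated tail element, and the list is built by comprehension/extend.
import Mathlib
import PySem

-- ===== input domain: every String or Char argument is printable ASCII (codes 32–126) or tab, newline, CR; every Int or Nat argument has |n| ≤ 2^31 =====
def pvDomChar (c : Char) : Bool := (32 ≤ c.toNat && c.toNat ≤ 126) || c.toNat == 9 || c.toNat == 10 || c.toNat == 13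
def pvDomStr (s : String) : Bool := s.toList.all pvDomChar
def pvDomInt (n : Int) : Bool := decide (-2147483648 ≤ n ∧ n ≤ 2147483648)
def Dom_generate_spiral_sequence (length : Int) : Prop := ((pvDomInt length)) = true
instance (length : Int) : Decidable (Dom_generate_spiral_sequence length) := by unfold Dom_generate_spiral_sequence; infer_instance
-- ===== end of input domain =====

-- B replaces A's running-total emit loop by closed-form arithmetic (isqrt for the number of
-- complete 4-copy groups, divmod for the truncated tail); objective: alternative algorithm.

-- ===== PORT A =====
-- inner 'for _ in range(4)' with its break; state (total, dc, seq), fuel = remaining range steps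
def pvGroupA (L : Int) : Int → Int → List Int → Nat → (List Int × Int × Int)
  | total, dc, seq, 0 => (seq, total, dc)
  | total, dc, seq, n+1 =>
    let dc' := if L < total + dc then L - total else dc
    let seq' := seq ++ [dc']
    let total' := total + dc'
    if total' = L then (seq', total', dc')
    else pvGroupA L total' dc' seq' n

-- outer 'while total_moves_made < length'; fuel bounds the number of groups (each executed
-- group strictly increases total, so length.toNat groups always suffice)
def pvOuterA (L : Int) : Nat → Int → Int → List Int → List Int
  | 0, _, _, seq => seq
  | f+1, total, dc, seq =>
    if total < L then
      match pvGroupA L total dc seq 4 with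
      | (seq', total', dc') => pvOuterA L f total' (dc' + 1) seq'
    else seq

def generate_spiral_sequence (length : Int) : List Int :=
  if length < 1 then [] else pvOuterA length length.toNat 0 1 []

-- ===== PORT B =====
def generate_spiral_sequence_alt (length : Int) : List Int :=
  if length < 1 then []
  else
    let g : Int := PySem.Int.floordiv ((Nat.sqrt (2 * length + 1).toNat : Int) - 1) 2
    let rem : Int := length - 2 * g * (g + 1)
    let v : Int := g + 1
    let k : Int := PySem.Int.floordiv rem v
    let r : Int := PySem.Int.mod rem v
    ((PySem.List.pyRange 1 (g + 1) 1).flatMap (fun val => List.replicate 4 val))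
      ++ List.replicate k.toNat v
      ++ (if r ≠ 0 then [r] else [])

-- ===== PRECONDITION & SPEC =====
def Spec_generate_spiral_sequence (length : Int) (out : List Int) : Prop := out = generate_spiral_sequence_alt length
instance (length : Int) (out : List Int) : Decidable (Spec_generate_spiral_sequence length out) := by unfold Spec_generate_spiral_sequence; infer_instance

-- ===== CLAIM (what is proved, stated in full; the proofs are below) =====
def Claim_equal_generate_spiral_sequence : Prop := ∀ (length : Int), Dom_generate_spiral_sequence length → Spec_generate_spiral_sequence length (generate_spiral_sequence length)

-- ===== LEMMAS AND PROOFS =====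

-- reference sequence: the tail of the spiral after g complete groups of four
def pvTail (L : Int) (g : Nat) : List Int :=
  if _h1 : 2 * (g : Int) * (g + 1) < L then
    if _h2 : 2 * ((g : Int) + 1) * ((g : Int) + 2) ≤ L then
      List.replicate 4 ((g : Int) + 1) ++ pvTail L (g + 1)
    else
      List.replicate ((L - 2 * (g : Int) * (g + 1)) / ((g : Int) + 1)).toNat ((g : Int) + 1)
        ++ (if (L - 2 * (g : Int) * (g + 1)) % ((g : Int) + 1) = 0 then []
            else [(L - 2 * (g : Int) * (g + 1)) % ((g : Int) + 1)])
  else []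
termination_by (L - 2 * (g : Int) * (g + 1)).toNat
decreasing_by
  push_cast
  have e : 2 * ((g : Int) + 1) * ((g : Int) + 1 + 1) = 2 * (g : Int) * ((g : Int) + 1) + 4 * (g : Int) + 4 := by ring
  omega

lemma pvTail_stop (L : Int) (g : Nat) (h : ¬ 2 * (g : Int) * (g + 1) < L) : pvTail L g = [] := by
  unfold pvTail; simp [h]

lemma pvTail_step (L : Int) (g : Nat) (h1 : 2 * (g : Int) * (g + 1) < L)
    (h2 : 2 * ((g : Int) + 1) * ((g : Int) + 2) ≤ L) :
    pvTail L g = List.replicate 4 ((g : Int) + 1) ++ pvTail L (g + 1) := by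
  conv_lhs => unfold pvTail
  rw [dif_pos h1, dif_pos h2]

lemma pvTail_last (L : Int) (g : Nat) (h1 : 2 * (g : Int) * (g + 1) < L)
    (h2 : ¬ 2 * ((g : Int) + 1) * ((g : Int) + 2) ≤ L) :
    pvTail L g = List.replicate ((L - 2 * (g : Int) * (g + 1)) / ((g : Int) + 1)).toNat ((g : Int) + 1)
        ++ (if (L - 2 * (g : Int) * (g + 1)) % ((g : Int) + 1) = 0 then []
            else [(L - 2 * (g : Int) * (g + 1)) % ((g : Int) + 1)]) := by
  unfold pvTail; simp [h1, h2]

lemma pvGroupA_cont (L t d : Int) (seq : List Int) (n : Nat)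
    (h1 : ¬ L < t + d) (h2 : ¬ t + d = L) :
    pvGroupA L t d seq (n+1) = pvGroupA L (t+d) d (seq ++ [d]) n := by
  simp only [pvGroupA, if_neg h1, if_neg h2]

lemma pvGroupA_breakEq (L t d : Int) (seq : List Int) (n : Nat)
    (h1 : ¬ L < t + d) (h2 : t + d = L) :
    pvGroupA L t d seq (n+1) = (seq ++ [d], L, d) := by
  simp only [pvGroupA, if_neg h1]
  simp [h2]

lemma pvGroupA_trunc (L t d : Int) (seq : List Int) (n : Nat) (h1 : L < t + d) :
    pvGroupA L t d seq (n+1) = (seq ++ [L - t], L, L - t) := by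
  simp only [pvGroupA, if_pos h1]
  have h2 : t + (L - t) = L := by omega
  simp [h2]

lemma pvOuterA_halt (L : Int) (f : Nat) (dc : Int) (seq : List Int) :
    pvOuterA L f L dc seq = seq := by
  cases f <;> simp [pvOuterA]

-- a full group of four appends four copies of d
lemma pvGroupA_full (L t d : Int) (seq : List Int) (hd : 1 ≤ d) (h : t + 4 * d ≤ L) :
    pvGroupA L t d seq 4 = (seq ++ List.replicate 4 d, t + 4 * d, d) := by
  rw [pvGroupA_cont L t d seq 3 (by omega) (by omega)]
  rw [pvGroupA_cont L (t+d) d _ 2 (by omega) (by omega)]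
  rw [pvGroupA_cont L (t+d+d) d _ 1 (by omega) (by omega)]
  by_cases hb : t + d + d + d + d = L
  · rw [pvGroupA_breakEq L (t+d+d+d) d _ 0 (by omega) (by omega)]
    simp [List.replicate_succ, List.append_assoc]
    omega
  · rw [pvGroupA_cont L (t+d+d+d) d _ 0 (by omega) (by omega)]
    simp [pvGroupA, List.replicate_succ, List.append_assoc]
    omega

-- a partial group: ⌊m/d⌋ copies of d, then the positive remainder if any; total reaches L
lemma pvGroupA_part (L t d : Int) (seq : List Int) (hd : 1 ≤ d)
    (h0 : t < L) (h : L < t + 4 * d) :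
    ∃ dc', pvGroupA L t d seq 4 =
      (seq ++ List.replicate ((L - t) / d).toNat d
           ++ (if (L - t) % d = 0 then [] else [(L - t) % d]), L, dc') := by
  have hdpos : 0 < d := by omega
  have hed : d * ((L - t) / d) + (L - t) % d = L - t := by
    have h := Int.mul_ediv_add_emod (L - t) d
    omega
  have hm0 : 0 ≤ (L - t) % d := Int.emod_nonneg _ (by omega)
  have hmlt : (L - t) % d < d := Int.emod_lt_of_pos _ hdpos
  have hk0 : 0 ≤ (L - t) / d := Int.ediv_nonneg (by omega) (by omega)
  have hk4 : (L - t) / d < 4 := by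
    by_contra hc
    push_neg at hc
    have h4 : d * 4 ≤ d * ((L - t) / d) := mul_le_mul_of_nonneg_left hc (le_of_lt hdpos)
    omega
  have hq : (L - t) / d = 0 ∨ (L - t) / d = 1 ∨ (L - t) / d = 2 ∨ (L - t) / d = 3 := by omega
  rcases hq with hq | hq | hq | hq <;> rw [hq] at hed ⊢
  · -- k = 0: first step already truncates
    refine ⟨L - t, ?_⟩
    rw [pvGroupA_trunc L t d seq 3 (by omega)]
    have hr : ¬ (L - t) % d = 0 := by omega
    have hrv : (L - t) % d = L - t := by omega
    rw [if_neg hr, hrv]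
    simp
  · by_cases hr : (L - t) % d = 0
    · refine ⟨d, ?_⟩
      rw [pvGroupA_breakEq L t d seq 3 (by omega) (by omega)]
      simp [hr, List.replicate_succ]
    · refine ⟨(L - t) % d, ?_⟩
      rw [pvGroupA_cont L t d seq 3 (by omega) (by omega)]
      rw [pvGroupA_trunc L (t+d) d _ 2 (by omega)]
      have hrv : L - (t + d) = (L - t) % d := by omega
      rw [if_neg hr, hrv]
      simp [List.replicate_succ, List.append_assoc]
  · by_cases hr : (L - t) % d = 0
    · refine ⟨d, ?_⟩
      rw [pvGroupA_cont L t d seq 3 (by omega) (by omega)]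
      rw [pvGroupA_breakEq L (t+d) d _ 2 (by omega) (by omega)]
      simp [hr, List.replicate_succ, List.append_assoc]
    · refine ⟨(L - t) % d, ?_⟩
      rw [pvGroupA_cont L t d seq 3 (by omega) (by omega)]
      rw [pvGroupA_cont L (t+d) d _ 2 (by omega) (by omega)]
      rw [pvGroupA_trunc L (t+d+d) d _ 1 (by omega)]
      have hrv : L - (t + d + d) = (L - t) % d := by omega
      rw [if_neg hr, hrv]
      simp [List.replicate_succ, List.append_assoc]
  · by_cases hr : (L - t) % d = 0
    · refine ⟨d, ?_⟩
      rw [pvGroupA_cont L t d seq 3 (by omega) (by omega)]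
      rw [pvGroupA_cont L (t+d) d _ 2 (by omega) (by omega)]
      rw [pvGroupA_breakEq L (t+d+d) d _ 1 (by omega) (by omega)]
      simp [hr, List.replicate_succ, List.append_assoc]
    · refine ⟨(L - t) % d, ?_⟩
      rw [pvGroupA_cont L t d seq 3 (by omega) (by omega)]
      rw [pvGroupA_cont L (t+d) d _ 2 (by omega) (by omega)]
      rw [pvGroupA_cont L (t+d+d) d _ 1 (by omega) (by omega)]
      rw [pvGroupA_trunc L (t+d+d+d) d _ 0 (by omega)]
      have hrv : L - (t + d + d + d) = (L - t) % d := by omega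
      rw [if_neg hr, hrv]
      simp [List.replicate_succ, List.append_assoc]

-- A's loop, started at the state after g complete groups, produces pvTail L g
lemma pvOuterA_eq_tail (L : Int) :
    ∀ (f : Nat) (g : Nat) (seq : List Int),
      L - 2 * (g : Int) * (g + 1) ≤ (f : Int) →
      pvOuterA L f (2 * (g : Int) * (g + 1)) ((g : Int) + 1) seq = seq ++ pvTail L g := by
  intro f
  induction f with
  | zero =>
    intro g seq hf
    rw [pvTail_stop L g (by omega)]
    simp [pvOuterA]
  | succ f ih =>
    intro g seq hf
    by_cases hlt : 2 * (g : Int) * (g + 1) < L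
    · simp only [pvOuterA, if_pos hlt]
      by_cases hfull : 2 * ((g : Int) + 1) * ((g : Int) + 2) ≤ L
      · -- a full group of 4 copies of g+1
        have he : 2 * (g : Int) * (g + 1) + 4 * ((g : Int) + 1) = 2 * ((g : Int) + 1) * ((g : Int) + 2) := by ring
        rw [pvGroupA_full L _ _ seq (by omega) (by omega)]
        have harg : 2 * (g : Int) * (g + 1) + 4 * ((g : Int) + 1) = 2 * ((g + 1 : Nat) : Int) * (((g + 1 : Nat) : Int) + 1) := by push_cast; ring
        have harg2 : ((g : Int) + 1) + 1 = ((g + 1 : Nat) : Int) + 1 := by push_cast; ring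
        rw [harg, harg2]
        rw [ih (g + 1) _ (by
          push_cast
          have e : 2 * ((g : Int) + 1) * ((g : Int) + 1 + 1) = 2 * (g : Int) * ((g : Int) + 1) + 4 * (g : Int) + 4 := by ring
          have e2 : 2 * ((g : Int) + 1) * ((g : Int) + 2) = 2 * (g : Int) * ((g : Int) + 1) + 4 * (g : Int) + 4 := by ring
          omega)]
        rw [pvTail_step L g hlt hfull]
        simp [List.append_assoc]
      · -- the last, partial group; total reaches L and the loop stops
        obtain ⟨dc', hgrp⟩ :=
          pvGroupA_part L (2 * (g : Int) * (g + 1)) ((g : Int) + 1) seq (by omega) hlt (by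
            have e2 : 2 * ((g : Int) + 1) * ((g : Int) + 2) = 2 * (g : Int) * ((g : Int) + 1) + 4 * ((g : Int) + 1) := by ring
            omega)
        rw [hgrp, pvOuterA_halt]
        rw [pvTail_last L g hlt hfull]
        simp [List.append_assoc]
    · rw [pvTail_stop L g hlt]
      simp [pvOuterA, hlt]

-- peel the g complete groups off the front of pvTail L 0
lemma pvTail_peel (L : Int) (g : Nat) (h : 2 * (g : Int) * (g + 1) ≤ L) :
    pvTail L 0 = List.flatMap (fun i : Nat => List.replicate 4 ((i : Int) + 1)) (List.range g) ++ pvTail L g := by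
  induction g with
  | zero => simp
  | succ g ih =>
    have hcast : ((g + 1 : Nat) : Int) = (g : Int) + 1 := by push_cast; ring
    rw [hcast] at h
    have e : 2 * ((g : Int) + 1) * ((g : Int) + 1 + 1) = 2 * (g : Int) * ((g : Int) + 1) + 4 * (g : Int) + 4 := by ring
    have hle : 2 * (g : Int) * ((g : Int) + 1) ≤ L := by omega
    rw [ih hle]
    rw [pvTail_step L g (by omega) (by
      have e2 : 2 * ((g : Int) + 1) * ((g : Int) + 2) = 2 * ((g : Int) + 1) * ((g : Int) + 1 + 1) := by ring
      omega)]
    rw [List.range_succ, List.flatMap_append]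
    simp [List.append_assoc]

-- the isqrt-derived g of B is exactly the number of complete groups
lemma pvIsqrtG (L : Int) (hL : 1 ≤ L) :
    ∃ g : Nat,
      PySem.Int.floordiv ((Nat.sqrt (2 * L + 1).toNat : Int) - 1) 2 = (g : Int) ∧
      2 * (g : Int) * (g + 1) ≤ L ∧ L < 2 * ((g : Int) + 1) * ((g : Int) + 2) := by
  set n : Nat := (2 * L + 1).toNat with hn
  have hnL : (n : Int) = 2 * L + 1 := by omega
  set s : Nat := Nat.sqrt n with hs
  have hs1 : 1 ≤ s := by
    have h1 : 1 * 1 ≤ n := by omega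
    have := (Nat.le_sqrt).mpr h1
    omega
  refine ⟨(s - 1) / 2, ?_, ?_, ?_⟩
  · rw [PySem.Int.floordiv_eq_ediv_of_pos (by norm_num)]
    omega
  · have hsq : s * s ≤ n := by have h := Nat.sqrt_le' n; simpa [pow_two] using h
    have h2g : 2 * ((s - 1) / 2) + 1 ≤ s := by omega
    have hmul : (2 * ((s - 1) / 2) + 1) * (2 * ((s - 1) / 2) + 1) ≤ s * s := Nat.mul_le_mul h2g h2g
    have hfin : (2 * ((s - 1) / 2) + 1) * (2 * ((s - 1) / 2) + 1) ≤ n := le_trans hmul hsq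
    have hI : ((2 * ((s - 1) / 2 : Nat) + 1 : Nat) : Int) * ((2 * ((s - 1) / 2 : Nat) + 1 : Nat) : Int) ≤ (n : Int) := by exact_mod_cast hfin
    push_cast at hI ⊢
    nlinarith
  · have hsq : n < (s + 1) * (s + 1) := by
      have h := Nat.lt_succ_sqrt' n
      simpa [pow_two, Nat.succ_eq_add_one] using h
    have h2g : s ≤ 2 * ((s - 1) / 2) + 2 := by omega
    have hmul : (s + 1) * (s + 1) ≤ (2 * ((s - 1) / 2) + 3) * (2 * ((s - 1) / 2) + 3) :=
      Nat.mul_le_mul (by omega) (by omega)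
    have hfin : n < (2 * ((s - 1) / 2) + 3) * (2 * ((s - 1) / 2) + 3) := lt_of_lt_of_le hsq hmul
    have hI : (n : Int) < ((2 * ((s - 1) / 2 : Nat) + 3 : Nat) : Int) * ((2 * ((s - 1) / 2 : Nat) + 3 : Nat) : Int) := by exact_mod_cast hfin
    push_cast at hI ⊢
    nlinarith

-- B's range comprehension is the flatMap over List.range
lemma pvRangeFlat (g : Nat) :
    (PySem.List.pyRange 1 ((g : Int) + 1) 1).flatMap (fun val => List.replicate 4 val)
      = List.flatMap (fun i : Nat => List.replicate 4 ((i : Int) + 1)) (List.range g) := by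
  induction g with
  | zero =>
    rw [PySem.List.pyRange_one_eq_nil (by norm_num)]
    simp
  | succ g ih =>
    have hcast : ((g + 1 : Nat) : Int) = (g : Int) + 1 := by push_cast; ring
    rw [hcast, PySem.List.pyRange_one_succ_right (by omega), List.range_succ]
    rw [List.flatMap_append, List.flatMap_append, ih]
    simp

-- ===== VERDICT (by name: the statement is the Claim_ definition above) =====
theorem generate_spiral_sequence_spec : Claim_equal_generate_spiral_sequence := by
  intro L _
  unfold Spec_generate_spiral_sequence generate_spiral_sequence generate_spiral_sequence_alt
  by_cases hL : L < 1
  · simp [hL]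
  · push_neg at hL
    rw [if_neg (by omega), if_neg (by omega)]
    obtain ⟨g, hgdef, hg1, hg2⟩ := pvIsqrtG L hL
    have hA : pvOuterA L L.toNat 0 1 [] = pvTail L 0 := by
      have h := pvOuterA_eq_tail L L.toNat 0 [] (by push_cast; omega)
      norm_num at h
      exact h
    rw [hA, hgdef]
    simp only [PySem.Int.floordiv_eq_ediv_of_pos (show (0:Int) < (g : Int) + 1 by omega),
      PySem.Int.mod_eq_emod_of_pos (show (0:Int) < (g : Int) + 1 by omega)]
    rw [pvTail_peel L g hg1, pvRangeFlat g]
    simp only [List.append_assoc]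
    congr 1
    by_cases hrem : 2 * (g : Int) * (g + 1) < L
    · rw [pvTail_last L g hrem (by omega)]
      by_cases hr : (L - 2 * (g : Int) * (g + 1)) % ((g : Int) + 1) = 0
      · simp [hr]
      · simp
    · rw [pvTail_stop L g hrem]
      have hrem0 : L - 2 * (g : Int) * (g + 1) = 0 := by omega
      rw [hrem0]
      simp
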